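-- pv_equiv track=rewrite | github.com/kamilGie/WDI | Zestaw_3:_Tablice_o_większej_liczbie_wymiarów/102/Rozwiązania/wiki.py | Zadanie_102
-- ===== SOURCE A (Python) =====
-- def same_digits(a, b):
--     T1 = [0] * 10
--     T2 = [0] * 10
--
--     while a > 0:
--         T1[a % 10] = 1
--         a = a // 10
--
--     while b > 0:
--         T2[b % 10] = 1
--         b = b // 10
--
--     return T1 == T2
--
-- def is_on_board(T, y, x):
--     if 0 <= y < len(T):
--         if 0 <= x < len(T):
--             return True
--     return False
--
-- def Zadanie_102(T):
--     cnt = 0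
--     n = len(T)
--
--     for y in range(n):
--         for x in range(n):
--             flag = True
--             jumps = [
--                 (-1, -1),
--                 (-1, 0),
--                 (-1, 1),
--                 (0, 1),
--                 (1, 1),
--                 (1, 0),
--                 (1, -1),
--                 (0, -1),
--             ]
--             for ele in jumps:
--                 if is_on_board(T, y + ele[0], x + ele[1]):
--                     if not same_digits(T[y][x], T[y + ele[0]][x + ele[1]]):
--                         flag = False
--                         break
--             if flag == True:
--                 cnt += 1
--     return cnt
-- ===== SOURCE B (Python) =====
-- def _digit_mask(a):
--     m = 0
--     while a > 0:
--         m |= 1 << (a % 10)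
--         a //= 10
--     return m
--
-- _JUMPS = [(-1, -1), (-1, 0), (-1, 1), (0, 1), (1, 1), (1, 0), (1, -1), (0, -1)]
--
-- def Zadanie_102(T):
--     n = len(T)
--     S = [[_digit_mask(v) for v in row] for row in T]
--     cnt = 0
--     for y in range(n):
--         for x in range(n):
--             if all(S[y + dy][x + dx] == S[y][x]
--                    for (dy, dx) in _JUMPS
--                    if 0 <= y + dy < n and 0 <= x + dx < n):
--                 cnt += 1
--     return cnt
-- ===== Notes on version B (the rewrite author's own statement) =====
-- stated objective: faster
-- what changed: B precomputes a 10-bit digit-set bitmask for every cell in one pass and then counts cells by comparing precomputed neighbor masks, instead of rebuilding two 10-slot digit tables from scratch for every cell/neighbor pair as A's same_digits does.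
import Mathlib
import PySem

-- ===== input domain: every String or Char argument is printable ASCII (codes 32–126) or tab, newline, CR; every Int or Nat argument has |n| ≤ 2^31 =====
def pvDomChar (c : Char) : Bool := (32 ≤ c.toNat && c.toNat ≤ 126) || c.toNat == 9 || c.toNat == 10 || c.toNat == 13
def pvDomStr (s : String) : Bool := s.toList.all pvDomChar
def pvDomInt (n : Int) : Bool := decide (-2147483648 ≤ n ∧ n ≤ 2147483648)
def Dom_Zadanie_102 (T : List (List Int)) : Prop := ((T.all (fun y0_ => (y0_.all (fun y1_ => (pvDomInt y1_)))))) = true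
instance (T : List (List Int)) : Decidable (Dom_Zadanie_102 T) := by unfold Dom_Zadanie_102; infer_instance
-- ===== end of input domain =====

-- B precomputes a 10-bit digit-set bitmask per cell once and compares precomputed neighbor
-- masks, instead of rebuilding two 10-slot digit tables for every cell/neighbor pair (constant-factor change).


-- ===== PORT A =====
-- while a > 0: T1[a % 10] = 1; a = a // 10   (a % 10 is nonnegative since the divisor is positive, so .toNat is exact)
def sameDigitsGo (a : Int) (t : List Int) : List Int :=
  if a > 0 then sameDigitsGo (PySem.Int.floordiv a 10) (t.set (PySem.Int.mod a 10).toNat 1) else t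
termination_by a.toNat
decreasing_by
  rename_i h
  rw [PySem.Int.floordiv_eq_ediv_of_pos (by norm_num)]
  omega

def same_digits (a b : Int) : Bool :=
  let T1 := sameDigitsGo a (List.replicate 10 0)
  let T2 := sameDigitsGo b (List.replicate 10 0)
  T1 == T2

def is_on_board (T : List (List Int)) (y x : Int) : Bool :=
  if 0 ≤ y ∧ y < (T.length : Int) then
    (if 0 ≤ x ∧ x < (T.length : Int) then true else false)
  else false

def jumpsA : List (Int × Int) :=
  [(-1, -1), (-1, 0), (-1, 1), (0, 1), (1, 1), (1, 0), (1, -1), (0, -1)]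

-- T[y][x]; under Pre_ every access A performs is in range, so the default is never used
def cellA (T : List (List Int)) (y x : Int) : Int :=
  PySem.List.pyGetD (PySem.List.pyGetD T y []) x 0

-- the 'for ele in jumps' loop with its break, returning flag
def innerA (T : List (List Int)) (y x : Int) : List (Int × Int) → Bool
  | [] => true
  | e :: rest =>
    if is_on_board T (y + e.1) (x + e.2) then
      if !(same_digits (cellA T y x) (cellA T (y + e.1) (x + e.2))) then false
      else innerA T y x rest
    else innerA T y x rest

def Zadanie_102 (T : List (List Int)) : Int :=
  let n : Int := T.length
  (PySem.List.pyRange 0 n 1).foldl (fun cnt y =>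
    (PySem.List.pyRange 0 n 1).foldl (fun cnt x =>
      let flag := innerA T y x jumpsA
      if flag = true then cnt + 1 else cnt) cnt) 0

-- ===== PORT B =====
-- m |= 1 << (a % 10); a //= 10   (the shift amount a % 10 is nonnegative, so .toNat is exact)
def maskGo (a m : Int) : Int :=
  if a > 0 then maskGo (PySem.Int.floordiv a 10) (PySem.Int.bor m ((1 : Int) <<< (PySem.Int.mod a 10).toNat)) else m
termination_by a.toNat
decreasing_by
  rename_i h
  rw [PySem.Int.floordiv_eq_ediv_of_pos (by norm_num)]
  omega

def digitMask (a : Int) : Int := maskGo a 0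

def jumpsB : List (Int × Int) :=
  [(-1, -1), (-1, 0), (-1, 1), (0, 1), (1, 1), (1, 0), (1, -1), (0, -1)]

-- S[y][x]; under Pre_ every access B performs is in range, so the default is never used
def cellB (S : List (List Int)) (y x : Int) : Int :=
  PySem.List.pyGetD (PySem.List.pyGetD S y []) x 0

def Zadanie_102_alt (T : List (List Int)) : Int :=
  let n : Int := T.length
  let S := T.map (fun row => row.map digitMask)
  (PySem.List.pyRange 0 n 1).foldl (fun cnt y =>
    (PySem.List.pyRange 0 n 1).foldl (fun cnt x =>
      if jumpsB.all (fun e =>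
          if 0 ≤ y + e.1 ∧ y + e.1 < n ∧ 0 ≤ x + e.2 ∧ x + e.2 < n then
            cellB S (y + e.1) (x + e.2) == cellB S y x
          else true)
      then cnt + 1 else cnt) cnt) 0

-- ===== PRECONDITION & SPEC =====
-- Pre_ excludes ragged boards with at least 2 rows: on those A always raises IndexError
-- (some T[y][x] with x < len(T) beyond its row is reached); with 0 or 1 rows no cell is ever indexed.
def Pre_Zadanie_102 (T : List (List Int)) : Prop :=
  T.length ≤ 1 ∨ ∀ row ∈ T, T.length ≤ row.length
instance (T : List (List Int)) : Decidable (Pre_Zadanie_102 T) := by unfold Pre_Zadanie_102; infer_instance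

def pvWitness_Zadanie_102 : List (List Int) := [[12, 3], [21, 30]]

def Spec_Zadanie_102 (T : List (List Int)) (out : Int) : Prop := out = Zadanie_102_alt T
instance (T : List (List Int)) (out : Int) : Decidable (Spec_Zadanie_102 T out) := by unfold Spec_Zadanie_102; infer_instance

-- ===== CLAIM (what is proved, stated in full; the proofs are below) =====
def Claim_equal_Zadanie_102 : Prop := ∀ (T : List (List Int)), Dom_Zadanie_102 T → Pre_Zadanie_102 T → Spec_Zadanie_102 T (Zadanie_102 T)

-- ===== LEMMAS AND PROOFS =====

-- Nat-valued mirror of maskGo, for bit-level reasoning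
def maskGoN (a : Int) (m : Nat) : Nat :=
  if a > 0 then maskGoN (PySem.Int.floordiv a 10) (m ||| (1 <<< (PySem.Int.mod a 10).toNat)) else m
termination_by a.toNat
decreasing_by
  rename_i h
  rw [PySem.Int.floordiv_eq_ediv_of_pos (by norm_num)]
  omega

-- the 10-slot 0/1 table determined by a 10-bit mask
def maskToList (m : Nat) : List Int :=
  (List.range 10).map (fun i => if m.testBit i then 1 else 0)

theorem testBit_or_shift (m d i : Nat) : (m ||| (1 <<< d)).testBit i = (m.testBit i || decide (d = i)) := by
  simp only [Nat.testBit_or, Nat.testBit_shiftLeft]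
  by_cases h : d = i
  · subst h; simp
  · by_cases h2 : d ≤ i
    · have h3 : Nat.testBit 1 (i - d) = false :=
        Nat.testBit_eq_false_of_lt (by
          have : i - d ≥ 1 := by omega
          calc (1:Nat) < 2^1 := by norm_num
            _ ≤ 2^(i-d) := Nat.pow_le_pow_right (by norm_num) this)
      simp [h, h2, h3]
    · simp [h, h2]

theorem maskToList_set (m : Nat) (d : Nat) :
    (maskToList m).set d 1 = maskToList (m ||| (1 <<< d)) := by
  apply List.ext_getElem
  · simp [maskToList]
  intro i hi1 hi2
  have hi : i < 10 := by simpa [maskToList] using hi2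
  rw [List.getElem_set]
  simp only [maskToList, List.getElem_map, List.getElem_range, testBit_or_shift]
  by_cases hdi : d = i
  · subst hdi; simp
  · simp [hdi]

theorem maskGoN_lt : ∀ (a : Int) (m : Nat), m < 1024 → maskGoN a m < 1024 := by
  intro a m
  induction a, m using maskGoN.induct with
  | case1 a m h ih =>
    intro hm
    rw [maskGoN, if_pos h]
    apply ih
    have e : (1024:Nat) = 2 ^ 10 := by norm_num
    rw [e] at hm ⊢
    apply Nat.or_lt_two_pow hm
    have h1 : PySem.Int.mod a 10 < 10 := PySem.Int.mod_lt _ (by norm_num)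
    have h2 : (0:Int) ≤ PySem.Int.mod a 10 := PySem.Int.mod_nonneg _ (by norm_num)
    rw [Nat.one_shiftLeft]
    exact lt_of_le_of_lt (Nat.pow_le_pow_right (by norm_num) (show (PySem.Int.mod a 10).toNat ≤ 9 by omega)) (by norm_num)
  | case2 a m h => intro hm; rw [maskGoN, if_neg h]; exact hm

theorem maskToList_inj (m1 m2 : Nat) (h1 : m1 < 1024) (h2 : m2 < 1024)
    (h : maskToList m1 = maskToList m2) : m1 = m2 := by
  apply Nat.eq_of_testBit_eq
  intro i
  by_cases hi : i < 10
  · have e1 := congrArg (fun l => l[i]!) h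
    simp only [maskToList] at e1
    have l1 : ((List.range 10).map (fun i => if m1.testBit i then (1:Int) else 0))[i]! = if m1.testBit i then (1:Int) else 0 := by
      rw [List.getElem!_eq_getElem?_getD, List.getElem?_map, List.getElem?_range hi]; rfl
    have l2 : ((List.range 10).map (fun i => if m2.testBit i then (1:Int) else 0))[i]! = if m2.testBit i then (1:Int) else 0 := by
      rw [List.getElem!_eq_getElem?_getD, List.getElem?_map, List.getElem?_range hi]; rfl
    simp only [l1, l2] at e1
    by_cases b1 : m1.testBit i <;> by_cases b2 : m2.testBit i <;> simp [b1, b2] at e1 ⊢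
  · have hle : 10 ≤ i := by omega
    have hp : (1024:Nat) ≤ 2 ^ i := by
      calc (1024:Nat) = 2^10 := by norm_num
        _ ≤ 2^i := Nat.pow_le_pow_right (by norm_num) hle
    rw [Nat.testBit_eq_false_of_lt (by omega), Nat.testBit_eq_false_of_lt (by omega)]

theorem maskGo_natCast (a : Int) (m : Nat) : maskGo a (m : Int) = ((maskGoN a m : Nat) : Int) := by
  induction a, m using maskGoN.induct with
  | case1 a m h ih =>
    rw [maskGo, maskGoN, if_pos h, if_pos h]
    have e : PySem.Int.bor (m : Int) ((1 : Int) <<< (PySem.Int.mod a 10).toNat)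
        = ((m ||| (1 <<< (PySem.Int.mod a 10).toNat : Nat) : Nat) : Int) := by
      rw [show ((1:Int) <<< (PySem.Int.mod a 10).toNat) = (((1 <<< (PySem.Int.mod a 10).toNat : Nat) : Int)) from by push_cast [Int.natCast_shiftLeft]; rfl]
      exact PySem.Int.bor_natCast _ _
    rw [e, ih]
  | case2 a m h => rw [maskGo, maskGoN, if_neg h, if_neg h]

theorem sameDigitsGo_eq_maskToList (a : Int) (m : Nat) :
    sameDigitsGo a (maskToList m) = maskToList (maskGoN a m) := by
  induction a, m using maskGoN.induct with
  | case1 a m h ih =>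
    rw [sameDigitsGo, maskGoN, if_pos h, if_pos h]
    rw [maskToList_set m _, ih]
  | case2 a m h => rw [sameDigitsGo, maskGoN, if_neg h, if_neg h]

theorem replicate_eq_maskToList : List.replicate 10 (0:Int) = maskToList 0 := by decide

theorem same_digits_eq_mask (a b : Int) : same_digits a b = (digitMask a == digitMask b) := by
  have da : digitMask a = ((maskGoN a 0 : Nat) : Int) := by
    simpa using maskGo_natCast a 0
  have db : digitMask b = ((maskGoN b 0 : Nat) : Int) := by
    simpa using maskGo_natCast b 0
  simp only [same_digits, replicate_eq_maskToList, sameDigitsGo_eq_maskToList, da, db]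
  by_cases h : maskGoN a 0 = maskGoN b 0
  · simp [h]
  · have hne : maskToList (maskGoN a 0) ≠ maskToList (maskGoN b 0) := fun he =>
      h (maskToList_inj _ _ (maskGoN_lt a 0 (by norm_num)) (maskGoN_lt b 0 (by norm_num)) he)
    simp [h, hne]

theorem is_on_board_iff (T : List (List Int)) (y x : Int) :
    is_on_board T y x = true ↔ (0 ≤ y ∧ y < (T.length : Int) ∧ 0 ≤ x ∧ x < (T.length : Int)) := by
  simp only [is_on_board]
  split_ifs with h1 h2 <;> simp <;> omega

-- under the row-length hypothesis, the mask table reads back digitMask of the original cell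
theorem cell_map (T : List (List Int))
    (hrows : ∀ row ∈ T, T.length ≤ row.length) (y x : Int)
    (hy : 0 ≤ y ∧ y < (T.length : Int)) (hx : 0 ≤ x ∧ x < (T.length : Int)) :
    cellB (T.map (fun row => row.map digitMask)) y x = digitMask (cellA T y x) := by
  obtain ⟨hy0, hy1⟩ := hy
  obtain ⟨hx0, hx1⟩ := hx
  have hyl : y.toNat < T.length := by omega
  have hrow : T[y.toNat] ∈ T := List.getElem_mem _
  have hxr : x.toNat < (T[y.toNat]).length := by
    have := hrows _ hrow; omega
  rw [cellB, cellA,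
    PySem.List.pyGetD_eq_getElem (T.map (fun row => row.map digitMask)) [] hy0 (by simpa using hy1),
    PySem.List.pyGetD_eq_getElem T [] hy0 (by simpa using hy1),
    List.getElem_map,
    PySem.List.pyGetD_eq_getElem _ 0 hx0 (by simp only [List.length_map]; omega),
    PySem.List.pyGetD_eq_getElem _ 0 hx0 (by omega),
    List.getElem_map]

-- A's break loop agrees with B's all-quantified comparison of precomputed masks
theorem inner_eq (T : List (List Int)) (hrows : ∀ row ∈ T, T.length ≤ row.length)
    (y x : Int) (hy : 0 ≤ y ∧ y < (T.length : Int)) (hx : 0 ≤ x ∧ x < (T.length : Int)) :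
    ∀ l : List (Int × Int), innerA T y x l =
      l.all (fun e =>
        if 0 ≤ y + e.1 ∧ y + e.1 < (T.length : Int) ∧ 0 ≤ x + e.2 ∧ x + e.2 < (T.length : Int) then
          cellB (T.map (fun row => row.map digitMask)) (y + e.1) (x + e.2)
            == cellB (T.map (fun row => row.map digitMask)) y x
        else true) := by
  intro l
  induction l with
  | nil => rfl
  | cons e rest ih =>
    rw [innerA, List.all_cons]
    by_cases hob : is_on_board T (y + e.1) (x + e.2) = true
    · have hcond := (is_on_board_iff T (y + e.1) (x + e.2)).mp hob
      rw [if_pos hob, if_pos hcond]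
      rw [same_digits_eq_mask,
        ← cell_map T hrows y x hy hx,
        ← cell_map T hrows (y + e.1) (x + e.2) ⟨hcond.1, hcond.2.1⟩ ⟨hcond.2.2.1, hcond.2.2.2⟩]
      cases hb : (cellB (T.map (fun row => row.map digitMask)) y x
          == cellB (T.map (fun row => row.map digitMask)) (y + e.1) (x + e.2))
      · simp [Bool.beq_comm, hb]
      · rw [Bool.beq_comm] at hb
        simp [hb, ih]
    · rw [if_neg hob, if_neg (fun hc => hob ((is_on_board_iff T _ _).mpr hc))]
      simp [ih]

theorem main_thm (T : List (List Int)) (hpre : Pre_Zadanie_102 T) :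
    Zadanie_102 T = Zadanie_102_alt T := by
  have hsq : (∀ row ∈ T, T.length ≤ row.length) → Zadanie_102 T = Zadanie_102_alt T := by
    intro hrows
    rw [Zadanie_102, Zadanie_102_alt]
    apply PySem.List.foldl_congr_mem
    intro cnt y hym
    have hy := (PySem.List.mem_pyRange_one).mp hym
    apply PySem.List.foldl_congr_mem
    intro cnt x hxm
    have hx := (PySem.List.mem_pyRange_one).mp hxm
    simp only
    rw [inner_eq T hrows y x hy hx jumpsA]
    rfl
  rcases hpre with hle | hrows
  · rcases T with _ | ⟨row, rest⟩
    · rfl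
    · rcases rest with _ | ⟨r2, rest2⟩
      · have h0 : PySem.List.pyRange 0 1 1 = [0] := by decide
        rw [Zadanie_102, Zadanie_102_alt]
        simp only [List.length_cons, List.length_nil, Nat.cast_one, Nat.cast_ofNat,
          Nat.zero_add, Nat.cast_succ, Nat.cast_zero, zero_add, h0]
        norm_num [h0, innerA, jumpsA, jumpsB, is_on_board, List.all_cons]
      · simp at hle
  · exact hsq hrows

-- ===== VERDICT (by name: the statement is the Claim_ definition above) =====
theorem Zadanie_102_spec : Claim_equal_Zadanie_102 := by
  intro T _ hpre
  unfold Spec_Zadanie_102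
  exact main_thm T hpre
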